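-- pv_equiv track=rewrite | github.com/dmayilyan/path_shortner | main.py | create_mask
-- ===== SOURCE A (Python) =====
-- from typing import Iterable, List, Tuple
--
-- def create_mask(slice_list: List[str]) -> List[bool]:
--     mask = []
--     for vals in zip(*slice_list):
--         if len(set(vals)) != 1:
--             mask.append(True)
--         else:
--             mask.append(False)
--
--     SURROUND_SIZE = 1
--
--     mask_shifted = mask.copy()
--     mask_shifted += [False] * SURROUND_SIZE
--     mask_shifted = mask_shifted[SURROUND_SIZE:]
--
--     return [a or b for a, b in zip(mask, mask_shifted)]
-- ===== SOURCE B (Python) =====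
-- def create_mask(slice_list):
--     if not slice_list:
--         return []
--     n = min(len(s) for s in slice_list)
--     diff = [False] * n
--     for s, t in zip(slice_list, slice_list[1:]):
--         for j in range(n):
--             if s[j] != t[j]:
--                 diff[j] = True
--     out = []
--     carry = False
--     for d in reversed(diff):
--         out.append(d or carry)
--         carry = d
--     out.reverse()
--     return out
-- ===== Notes on version B (the rewrite author's own statement) =====
-- stated objective: alternative
-- what changed: Replaces A's column-transpose with set-cardinality tests plus a shifted-copy zip-OR by a row-pairwise pass (OR-ing elementwise inequality of each consecutive string pair into a diff array) followed by a right-to-left scan with a one-element carry that dilates the mask.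
import Mathlib
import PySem

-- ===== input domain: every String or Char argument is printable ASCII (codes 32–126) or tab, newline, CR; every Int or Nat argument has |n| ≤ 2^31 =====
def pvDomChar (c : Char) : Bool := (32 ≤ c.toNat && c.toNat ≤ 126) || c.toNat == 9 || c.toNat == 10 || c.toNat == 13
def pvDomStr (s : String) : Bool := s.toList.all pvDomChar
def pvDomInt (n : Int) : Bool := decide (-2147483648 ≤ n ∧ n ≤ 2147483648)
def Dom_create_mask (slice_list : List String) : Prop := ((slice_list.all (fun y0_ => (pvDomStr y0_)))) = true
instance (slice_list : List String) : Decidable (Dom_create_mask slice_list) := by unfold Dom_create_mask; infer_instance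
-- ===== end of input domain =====

-- B replaces A's transpose/set-cardinality diff plus shifted-copy zip-OR by a row-pairwise pass
-- (OR-ing inequality of consecutive string pairs into a diff array) and a right-to-left carry scan.

-- ===== PORT A =====
-- zip(*slice_list): columns of the strings, truncated to the shortest string; empty for an empty list.
-- Exact: every index j used is below the length of every string, so getD's default ' ' is never read.
def pvZipStarLen (ss : List String) : Nat :=
  match ss with
  | [] => 0
  | s :: rest => rest.foldl (fun m t => Nat.min m t.toList.length) s.toList.length

def pvZipStar (ss : List String) : List (List Char) :=
  (List.range (pvZipStarLen ss)).map (fun j => ss.map (fun s => s.toList.getD j ' '))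

def create_mask (slice_list : List String) : List Bool :=
  let mask := (pvZipStar slice_list).foldl
    (fun m vals => if PySem.Set.len (PySem.Set.ofList vals) ≠ 1 then m ++ [true] else m ++ [false]) []
  let mask_shifted := mask                                         -- mask.copy()
  let mask_shifted := mask_shifted ++ List.replicate 1 false       -- += [False] * SURROUND_SIZE
  let mask_shifted := PySem.List.slice mask_shifted (some 1) none  -- [SURROUND_SIZE:]
  (mask.zip mask_shifted).map (fun p => p.1 || p.2)

-- ===== PORT B =====
def create_mask_alt (slice_list : List String) : List Bool :=
  match slice_list with
  | [] => []
  | first :: rest =>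
    -- n = min(len(s) for s in slice_list): min over the nonempty list
    let n := rest.foldl (fun m t => Nat.min m t.toList.length) first.toList.length
    -- for s, t in zip(slice_list, slice_list[1:]): OR elementwise inequality into diff
    let diff := ((first :: rest).zip rest).foldl
      (fun diff p => (List.range n).foldl
        (fun d j => if p.1.toList.getD j ' ' != p.2.toList.getD j ' ' then d.set j true else d) diff)
      (List.replicate n false)
    -- right-to-left scan with a one-element carry, then reverse
    let out := diff.reverse.foldl
      (fun (acc : List Bool × Bool) d => (acc.1 ++ [d || acc.2], d)) ([], false)
    out.1.reverse

-- ===== PRECONDITION & SPEC =====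
def Spec_create_mask (slice_list : List String) (out : List Bool) : Prop := out = create_mask_alt slice_list
instance (slice_list : List String) (out : List Bool) : Decidable (Spec_create_mask slice_list out) := by unfold Spec_create_mask; infer_instance

-- ===== CLAIM (what is proved, stated in full; the proofs are below) =====
def Claim_equal_create_mask : Prop := ∀ (slice_list : List String), Dom_create_mask slice_list → Spec_create_mask slice_list (create_mask slice_list)

-- ===== LEMMAS AND PROOFS =====

-- the column-j "differs from the first string" test, used as common closed form
def pvDiff (first : String) (rest : List String) (j : Nat) : Bool :=
  (first :: rest).any (fun s => s.toList.getD j ' ' != first.toList.getD j ' ')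

-- len(set(x :: cs)) == 1 iff every element equals the head
lemma setlen_one (x : Char) (cs : List Char) :
    (PySem.Set.ofList (x :: cs)).length = 1 ↔ ∀ y ∈ cs, y = x := by
  have hd : PySem.Set.ofList (x :: cs) = PySem.List.dedup (x :: cs) := by simp
  have hx : x ∈ PySem.List.dedup (x :: cs) := by
    rw [PySem.List.mem_dedup]; exact List.mem_cons_self
  have hnd : (PySem.List.dedup (x :: cs)).Nodup := PySem.List.nodup_dedup _
  constructor
  · intro h1 y hy
    obtain ⟨z, hz⟩ := List.length_eq_one_iff.mp (hd ▸ h1)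
    have hxz : x = z := by have := hx; rw [hz] at this; simpa using this
    have hyz : y ∈ PySem.List.dedup (x :: cs) := by
      rw [PySem.List.mem_dedup]; exact List.mem_cons_of_mem _ hy
    rw [hz] at hyz; simpa [← hxz] using hyz
  · intro hall
    rw [hd]
    have hmem : ∀ y ∈ PySem.List.dedup (x :: cs), y = x := by
      intro y hy
      rw [PySem.List.mem_dedup] at hy
      rcases List.mem_cons.mp hy with h | h
      · exact h
      · exact hall y h
    match hD : PySem.List.dedup (x :: cs), hnd, hx, hmem with
    | [], _, hx', _ => simp at hx'
    | z :: t, hnd', _, hmem' =>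
      have hz : z = x := hmem' z List.mem_cons_self
      match t, hnd', hmem' with
      | [], _, _ => rfl
      | w :: t', hnd'', hmem'' =>
        have hw : w = x := hmem'' w (by simp)
        have : z ∉ w :: t' := (List.nodup_cons.mp hnd'').1
        exact absurd (by simp [hz, hw]) this

-- A's diff test on a nonempty column equals the any-vs-first test
lemma dset_eq_pvDiff (first : String) (rest : List String) (j : Nat) :
    (decide (PySem.Set.len (PySem.Set.ofList ((first :: rest).map (fun s => s.toList.getD j ' '))) ≠ 1))
      = pvDiff first rest j := by
  set g : String → Char := fun s => s.toList.getD j ' ' with hg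
  have h := setlen_one (g first) (rest.map g)
  have hpv : pvDiff first rest j = (rest.map g).any (fun y => y != g first) := by
    simp [pvDiff, List.any_map, Function.comp_def, hg]
  rw [hpv, show ((first :: rest).map (fun s => s.toList.getD j ' ')) = g first :: rest.map g from by simp [hg]]
  by_cases hc : ∀ y ∈ rest.map g, y = g first
  · have h1 : (PySem.Set.ofList (g first :: rest.map g)).length = 1 := h.mpr hc
    simp [PySem.Set.len, h1, List.any_eq_false]
    exact fun y hy => (hc (g y) (List.mem_map_of_mem hy))
  · have h1 : (PySem.Set.ofList (g first :: rest.map g)).length ≠ 1 := fun hh => hc (h.mp hh)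
    have hex : (rest.map g).any (fun y => y != g first) = true := by
      push Not at hc
      obtain ⟨y, hy, hne⟩ := hc
      refine (List.any_eq_true).mpr ⟨y, hy, ?_⟩
      simpa using hne
    simp [PySem.Set.len, h1, hex]

-- the if/append loop is a map
lemma foldl_if_tf {α : Type} (l : List α) (P : α → Prop) [DecidablePred P] (acc : List Bool) :
    l.foldl (fun a x => if P x then a ++ [true] else a ++ [false]) acc
      = acc ++ l.map (fun x => decide (P x)) := by
  have h : (fun (a : List Bool) x => if P x then a ++ [true] else a ++ [false])
      = fun a x => a ++ [decide (P x)] := by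
    funext a x; by_cases h : P x <;> simp [h]
  rw [h, PySem.List.foldl_append_singleton_eq_map]

-- A's value, in closed form
lemma create_mask_closed (first : String) (rest : List String) :
    create_mask (first :: rest)
      = (List.range (pvZipStarLen (first :: rest))).map
          (fun j => pvDiff first rest j ||
            (if j + 1 < pvZipStarLen (first :: rest) then pvDiff first rest (j + 1) else false)) := by
  set n := pvZipStarLen (first :: rest) with hn
  unfold create_mask
  have hmask : (pvZipStar (first :: rest)).foldl
      (fun m vals => if PySem.Set.len (PySem.Set.ofList vals) ≠ 1 then m ++ [true] else m ++ [false]) []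
      = (List.range n).map (fun j => pvDiff first rest j) := by
    rw [foldl_if_tf]
    unfold pvZipStar
    rw [List.map_map, List.nil_append, ← hn]
    exact List.map_congr_left (fun j _ => dset_eq_pvDiff first rest j)
  simp only [hmask]
  rw [show List.replicate 1 false = [false] from rfl, PySem.List.slice_from_one]
  refine List.ext_getElem (by simp) ?_
  intro i h1 h2
  have hi : i < n := by simpa using h2
  simp only [List.getElem_map, List.getElem_zip, List.getElem_tail, List.getElem_range]
  by_cases h : i + 1 < n
  · have : i + 1 < ((List.range n).map (fun j => pvDiff first rest j)).length := by simpa using h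
    rw [List.getElem_append_left this]
    simp [h]
  · rw [List.getElem_append_right (by simpa using h)]
    simp [h, hi]

-- ===== B-side lemmas =====

-- inner loop of the pairwise pass: conditional sets over range n, pointwise
lemma inner_set_foldl (c : Nat → Bool) (m : Nat) (d : List Bool) :
    (List.range m).foldl (fun d j => if c j then d.set j true else d) d
      = d.mapIdx (fun k b => b || (decide (k < m) && c k)) := by
  induction m generalizing d with
  | zero =>
    refine (List.ext_getElem (by simp) ?_).symm
    intro i h1 h2; simp
  | succ m ih =>
    rw [List.range_succ, List.foldl_append, ih]
    simp only [List.foldl_cons, List.foldl_nil]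
    by_cases hc : c m = true
    · simp only [hc, if_true]
      refine List.ext_getElem (by simp) ?_
      intro i h1 h2
      simp only [List.getElem_set, List.getElem_mapIdx]
      by_cases h5 : i = m
      · simp [h5, hc]
      · have : ¬ (m = i) := fun h => h5 h.symm
        have e1 : i < m + 1 ↔ i < m := by omega
        simp [this, e1]
    · simp only [Bool.not_eq_true] at hc
      simp only [hc, Bool.false_eq_true, if_false]
      refine List.ext_getElem (by simp) ?_
      intro i h1 h2
      simp only [List.getElem_mapIdx]
      by_cases h5 : i = m
      · simp [h5, hc]
      · have e1 : i < m + 1 ↔ i < m := by omega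
        simp [e1]

-- outer loop of the pairwise pass: fold over pairs accumulates an any
lemma outer_pairs_foldl (cp : String × String → Nat → Bool) (m : Nat)
    (ps : List (String × String)) (d : List Bool) :
    ps.foldl (fun d p => (List.range m).foldl
        (fun d j => if cp p j then d.set j true else d) d) d
      = d.mapIdx (fun k b => b || (decide (k < m) && ps.any (fun p => cp p k))) := by
  induction ps generalizing d with
  | nil =>
    refine (List.ext_getElem (by simp) ?_).symm
    intro i h1 h2; simp
  | cons p ps ih =>
    rw [List.foldl_cons, inner_set_foldl (cp p) m d, ih]
    refine List.ext_getElem (by simp) ?_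
    intro i h1 h2
    simp only [List.getElem_mapIdx, List.any_cons]
    by_cases hm : i < m
    · cases hb : cp p i <;> simp [hm]
    · simp [hm]

-- "some consecutive pair differs at j" = "some element differs from the head at j"
lemma pairwise_eq_anyfirst (g : String → Char) (x : String) (l : List String) :
    ((x :: l).zip l).any (fun p => g p.1 != g p.2) = l.any (fun s => g s != g x) := by
  induction l generalizing x with
  | nil => rfl
  | cons a t ih =>
    show ((g x != g a) || ((a :: t).zip t).any (fun p => g p.1 != g p.2))
        = ((g a != g x) || t.any (fun s => g s != g x))
    rw [ih a]
    by_cases h : g x = g a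
    · simp [h]
    · have h1 : (g x != g a) = true := by simpa using h
      have h2 : (g a != g x) = true := by simpa using fun e => h e.symm
      simp [h1, h2]

-- the reversed carry scan, characterised by a structural recursion
def pvDil : List Bool → List Bool
  | [] => []
  | d :: t => (d || t.headD false) :: pvDil t

lemma rev_carry_foldl (l : List Bool) :
    l.reverse.foldl (fun (acc : List Bool × Bool) d => (acc.1 ++ [d || acc.2], d)) ([], false)
      = ((pvDil l).reverse, l.headD false) := by
  rw [List.foldl_reverse]
  induction l with
  | nil => rfl
  | cons d t ih =>
    simp only [List.foldr_cons, ih]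
    cases t <;> simp [pvDil]

lemma pvDil_length (l : List Bool) : (pvDil l).length = l.length := by
  induction l with
  | nil => rfl
  | cons d t ih => simp [pvDil, ih]

lemma pvDil_getElem (l : List Bool) (i : Nat) (h : i < (pvDil l).length) :
    (pvDil l)[i] = (l[i]'(by rw [pvDil_length] at h; exact h) || l.getD (i + 1) false) := by
  induction l generalizing i with
  | nil => simp [pvDil] at h
  | cons d t ih =>
    cases i with
    | zero => cases t <;> rfl
    | succ i =>
      have h' : i < (pvDil t).length := by
        simpa [pvDil] using h
      simpa [pvDil] using ih i h'

-- B's value, in the same closed form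
lemma create_mask_alt_closed (first : String) (rest : List String) :
    create_mask_alt (first :: rest)
      = (List.range (pvZipStarLen (first :: rest))).map
          (fun j => pvDiff first rest j ||
            (if j + 1 < pvZipStarLen (first :: rest) then pvDiff first rest (j + 1) else false)) := by
  show (let n := rest.foldl (fun m t => Nat.min m t.toList.length) first.toList.length;
        let diff := ((first :: rest).zip rest).foldl
          (fun diff p => (List.range n).foldl
            (fun d j => if p.1.toList.getD j ' ' != p.2.toList.getD j ' ' then d.set j true else d) diff)
          (List.replicate n false)
        let out := diff.reverse.foldl
          (fun (acc : List Bool × Bool) d => (acc.1 ++ [d || acc.2], d)) ([], false)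
        out.1.reverse) = _
  have hn : rest.foldl (fun m t => Nat.min m t.toList.length) first.toList.length
      = pvZipStarLen (first :: rest) := rfl
  simp only [hn]
  set n := pvZipStarLen (first :: rest) with hdefn
  set g : Nat → String → Char := fun j s => s.toList.getD j ' ' with hdefg
  have hdiff : ((first :: rest).zip rest).foldl
      (fun diff p => (List.range n).foldl
        (fun d j => if p.1.toList.getD j ' ' != p.2.toList.getD j ' ' then d.set j true else d) diff)
      (List.replicate n false)
      = (List.range n).map (fun j => pvDiff first rest j) := by
    rw [outer_pairs_foldl (fun p j => g j p.1 != g j p.2) n]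
    refine List.ext_getElem (by simp) ?_
    intro i h1 h2
    have hi : i < n := by simpa using h1
    simp only [List.getElem_mapIdx, List.getElem_replicate, List.getElem_map, List.getElem_range]
    have hp : ((first :: rest).zip rest).any (fun p => g i p.1 != g i p.2)
        = rest.any (fun s => g i s != g i first) := pairwise_eq_anyfirst (g i) first rest
    have hpv : pvDiff first rest i = rest.any (fun s => g i s != g i first) := by
      simp [pvDiff, hdefg]
    rw [hpv, ← hp]
    simp [hi]
  simp only [hdiff, rev_carry_foldl]
  rw [List.reverse_reverse]
  refine List.ext_getElem (by simp [pvDil_length]) ?_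
  intro i h1 h2
  have hi : i < n := by simpa using h2
  rw [pvDil_getElem]
  simp only [List.getElem_map, List.getElem_range]
  congr 1
  by_cases h : i + 1 < n
  · rw [List.getD_eq_getElem _ _ (by simpa using h)]
    simp [h]
  · rw [List.getD_eq_default _ _ (by simpa using h)]
    simp [h]

-- ===== VERDICT (by name: the statement is the Claim_ definition above) =====
theorem create_mask_spec : Claim_equal_create_mask := by
  intro ss _
  unfold Spec_create_mask
  match ss with
  | [] => rfl
  | first :: rest => rw [create_mask_closed, create_mask_alt_closed]
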